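-- pv_equiv track=rewrite | github.com/hengruiyun/AI-Stock-Master | tools/update_translations_manager.py | generate_translations_code
-- ===== SOURCE A (Python) =====
-- def generate_translations_code(translations):
--     """生成翻译字典的Python代码"""
--     code_lines = []
--     code_lines.append("        self.translations = {")
--
--     # 生成中文翻译
--     zh_translations = {}
--     en_translations = {}
--
--     for key, value in translations.items():
--         if isinstance(value, dict) and 'zh' in value and 'en' in value:
--             zh_translations[key] = value['zh']
--             en_translations[key] = value['en']
--
--     # 中文翻译
--     code_lines.append('            "zh": {')
--     for key, zh_text in sorted(zh_translations.items()):
--         escaped_key = key.replace('"', '\\"')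
--         escaped_zh = zh_text.replace('"', '\\"')
--         code_lines.append(f'                "{escaped_key}": "{escaped_zh}",')
--     code_lines.append('            },')
--
--     # 英文翻译
--     code_lines.append('            "en": {')
--     for key, en_text in sorted(en_translations.items()):
--         escaped_key = key.replace('"', '\\"')
--         escaped_en = en_text.replace('"', '\\"')
--         code_lines.append(f'                "{escaped_key}": "{escaped_en}",')
--     code_lines.append('            }')
--
--     code_lines.append('        }')
--
--     return '\n'.join(code_lines)
-- ===== SOURCE B (Python) =====
-- def generate_translations_code(translations):
--     """生成翻译字典的Python代码"""
--     zh_block = ''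
--     en_block = ''
--     # one traversal of the key-sorted raw items emits BOTH blocks at once
--     for key, value in sorted(translations.items(), key=lambda kv: kv[0]):
--         if isinstance(value, dict) and 'zh' in value and 'en' in value:
--             k = key.replace('"', '\\"')
--             zh_block += '\n                "' + k + '": "' + value['zh'].replace('"', '\\"') + '",'
--             en_block += '\n                "' + k + '": "' + value['en'].replace('"', '\\"') + '",'
--     return ('        self.translations = {\n'
--             '            "zh": {' + zh_block + '\n'
--             '            },\n'
--             '            "en": {' + en_block + '\n'
--             '            }\n'
--             '        }')
-- ===== Notes on version B (the rewrite author's own statement) =====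
-- stated objective: alternative
-- what changed: B sorts the raw items by key BEFORE filtering and a single loop over that sorted list then emits BOTH blocks at once by direct string concatenation into two accumulators, instead of A's two parallel dicts, two separate sorts and two emission loops appending to a shared line list joined at the end.
import Mathlib
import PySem

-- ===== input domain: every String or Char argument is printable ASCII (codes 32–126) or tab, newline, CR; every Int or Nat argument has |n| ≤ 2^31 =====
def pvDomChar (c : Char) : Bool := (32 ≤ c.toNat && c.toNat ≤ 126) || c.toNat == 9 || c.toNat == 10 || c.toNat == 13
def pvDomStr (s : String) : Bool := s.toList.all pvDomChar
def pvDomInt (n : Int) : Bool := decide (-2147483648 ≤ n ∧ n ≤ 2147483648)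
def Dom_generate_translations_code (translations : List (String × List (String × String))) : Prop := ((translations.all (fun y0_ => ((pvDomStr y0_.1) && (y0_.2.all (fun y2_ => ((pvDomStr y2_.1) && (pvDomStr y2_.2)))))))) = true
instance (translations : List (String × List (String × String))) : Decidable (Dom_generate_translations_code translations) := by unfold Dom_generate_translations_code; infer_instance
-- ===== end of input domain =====

-- B sorts the raw items by key before filtering and a single loop over the sorted list emits both
-- blocks at once into two string accumulators, instead of A's two parallel dicts, two sorts and two
-- emission loops over a joined line list (objective: alternative).

-- ===== PORT A =====
-- 'zh' in value / value['zh'] on the dict value: PySem.Dict over the association list; the guard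
-- makes the lookups total, so value['zh'] is ported as getD (KeyError unreachable).
def generate_translations_code (translations : List (String × List (String × String))) : String :=
  let code_lines : List String := ["        self.translations = {"]
  let zhen := translations.foldl
    (fun (p : PySem.Dict String String × PySem.Dict String String) kv =>
      let v := PySem.Dict.mk kv.2
      if v.contains "zh" && v.contains "en" then
        (p.1.insert kv.1 (v.getD "zh" ""), p.2.insert kv.1 (v.getD "en" ""))
      else p)
    (PySem.Dict.empty, PySem.Dict.empty)
  let code_lines := code_lines ++ ["            \"zh\": {"]
  let code_lines := (PySem.List.sorted2 zhen.1.items (fun q => q.1) (fun q => q.2)).foldl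
    (fun acc q => acc ++ ["                \"" ++ PySem.Str.replace q.1 "\"" "\\\"" ++ "\": \"" ++ PySem.Str.replace q.2 "\"" "\\\"" ++ "\","]) code_lines
  let code_lines := code_lines ++ ["            },"]
  let code_lines := code_lines ++ ["            \"en\": {"]
  let code_lines := (PySem.List.sorted2 zhen.2.items (fun q => q.1) (fun q => q.2)).foldl
    (fun acc q => acc ++ ["                \"" ++ PySem.Str.replace q.1 "\"" "\\\"" ++ "\": \"" ++ PySem.Str.replace q.2 "\"" "\\\"" ++ "\","]) code_lines
  let code_lines := code_lines ++ ["            }"]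
  let code_lines := code_lines ++ ["        }"]
  PySem.Str.join "\n" code_lines

-- ===== PORT B =====
def generate_translations_code_alt (translations : List (String × List (String × String))) : String :=
  let blocks := (PySem.List.sorted translations (fun kv => kv.1)).foldl
    (fun (b : String × String) kv =>
      let v := PySem.Dict.mk kv.2
      if v.contains "zh" && v.contains "en" then
        let k := PySem.Str.replace kv.1 "\"" "\\\""
        (b.1 ++ ("\n                \"" ++ k ++ "\": \"" ++ PySem.Str.replace (v.getD "zh" "") "\"" "\\\"" ++ "\","),
         b.2 ++ ("\n                \"" ++ k ++ "\": \"" ++ PySem.Str.replace (v.getD "en" "") "\"" "\\\"" ++ "\","))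
      else b)
    ("", "")
  "        self.translations = {\n            \"zh\": {" ++ blocks.1
    ++ "\n            },\n            \"en\": {" ++ blocks.2
    ++ "\n            }\n        }"

-- ===== PRECONDITION & SPEC =====
-- Pre_ excludes association lists with duplicate keys (in the outer list or in a value's list):
-- they are not the image of any Python dict argument, so A's behaviour on them is undefined.
def Pre_generate_translations_code (translations : List (String × List (String × String))) : Prop :=
  (translations.map Prod.fst).Nodup ∧ ∀ kv ∈ translations, (kv.2.map Prod.fst).Nodup
instance (translations : List (String × List (String × String))) : Decidable (Pre_generate_translations_code translations) := by unfold Pre_generate_translations_code; infer_instance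

def pvWitness_generate_translations_code : (List (String × List (String × String))) :=
  [("greet", [("zh", "ni hao"), ("en", "hi \"there\"")]), ("skip", [("en", "only en")])]

def Spec_generate_translations_code (translations : List (String × List (String × String))) (out : String) : Prop := out = generate_translations_code_alt translations
instance (translations : List (String × List (String × String))) (out : String) : Decidable (Spec_generate_translations_code translations out) := by unfold Spec_generate_translations_code; infer_instance

-- ===== CLAIM (what is proved, stated in full; the proofs are below) =====
def Claim_equal_generate_translations_code : Prop := ∀ (translations : List (String × List (String × String))), Dom_generate_translations_code translations → Pre_generate_translations_code translations → Spec_generate_translations_code translations (generate_translations_code translations)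

-- ===== LEMMAS AND PROOFS =====

-- abbreviations used only by the proofs
def pvGuard (kv : String × List (String × String)) : Bool :=
  (PySem.Dict.mk kv.2).contains "zh" && (PySem.Dict.mk kv.2).contains "en"
def pvZh (kv : String × List (String × String)) : String := (PySem.Dict.mk kv.2).getD "zh" ""
def pvEn (kv : String × List (String × String)) : String := (PySem.Dict.mk kv.2).getD "en" ""
def pvEsc (s : String) : String := PySem.Str.replace s "\"" "\\\""
def pvLine (k v : String) : String := "                \"" ++ pvEsc k ++ "\": \"" ++ pvEsc v ++ "\","
def pvCat (ls : List String) : String := ls.foldr (· ++ ·) ""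
def pvStep (p : PySem.Dict String String × PySem.Dict String String)
    (kv : String × List (String × String)) :
    PySem.Dict String String × PySem.Dict String String :=
  let v := PySem.Dict.mk kv.2
  if v.contains "zh" && v.contains "en" then
    (p.1.insert kv.1 (v.getD "zh" ""), p.2.insert kv.1 (v.getD "en" ""))
  else p

theorem pvStep_pos (p : PySem.Dict String String × PySem.Dict String String)
    (kv : String × List (String × String)) (hg : pvGuard kv = true) :
    pvStep p kv = (p.1.insert kv.1 (pvZh kv), p.2.insert kv.1 (pvEn kv)) := by
  simp only [pvGuard] at hg
  simp only [pvStep, pvZh, pvEn]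
  rw [if_pos hg]

theorem pvStep_neg (p : PySem.Dict String String × PySem.Dict String String)
    (kv : String × List (String × String)) (hg : ¬ pvGuard kv = true) :
    pvStep p kv = p := by
  simp only [pvGuard] at hg
  simp only [pvStep]
  rw [if_neg (by simpa using hg)]

-- with pairwise-distinct first keys, Python's tuple sort is the sort by the first key alone
theorem pv_insertBy_congr {α : Type} (p q : α → α → Bool) (x : α) (acc : List α)
    (h : ∀ b ∈ acc, p x b = q x b) :
    PySem.List.insertBy p x acc = PySem.List.insertBy q x acc := by
  induction acc with
  | nil => rfl
  | cons y ys ih =>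
    simp only [PySem.List.insertBy]
    rw [h y (by simp)]
    split <;> simp_all

theorem pv_foldl_insertBy_congr {α : Type} (p q : α → α → Bool) (s : List α)
    (h : ∀ a ∈ s, ∀ b ∈ s, p a b = q a b) :
    ∀ (xs acc : List α), (∀ a ∈ xs, a ∈ s) → (∀ a ∈ acc, a ∈ s) →
      xs.foldl (fun acc x => PySem.List.insertBy p x acc) acc
        = xs.foldl (fun acc x => PySem.List.insertBy q x acc) acc := by
  intro xs
  induction xs with
  | nil => intro acc _ _; rfl
  | cons x t ih =>
    intro acc hxs hacc
    simp only [List.foldl_cons]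
    rw [pv_insertBy_congr p q x acc (fun b hb => h x (hxs x (by simp)) b (hacc b hb)), ih]
    · intro a ha; exact hxs a (by simp [ha])
    · intro a ha
      rcases (PySem.List.mem_insertBy q x a acc).mp ha with h1 | h1
      · exact h1 ▸ hxs x (by simp)
      · exact hacc a h1

theorem pv_sorted2_eq_sorted {α : Type} (xs : List α) (k1 : α → String) (k2 : α → String)
    (hnd : (xs.map k1).Nodup) :
    PySem.List.sorted2 xs k1 k2 = PySem.List.sorted xs k1 := by
  rw [PySem.List.sorted_eq_foldl_insertBy]
  simp only [PySem.List.sorted2]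
  refine pv_foldl_insertBy_congr _ _ xs ?_ xs [] (fun a ha => ha) (by simp)
  intro a ha b hb
  by_cases hab : a = b
  · subst hab; simp
  · have hne : k1 a ≠ k1 b := fun hk => hab (List.inj_on_of_nodup_map hnd ha hb hk)
    rcases lt_trichotomy (k1 a) (k1 b) with hlt | heq | hgt
    · simp [hlt]
    · exact absurd heq hne
    · simp [hgt, not_lt_of_gt hgt]

-- sorting a fst-preserving image = image of the sort (distinct first keys)
theorem pv_sorted_map {α β : Type} (E : List α) (h : α → β) (kE : α → String) (kB : β → String)
    (hfst : ∀ e, kB (h e) = kE e) (hnd : (E.map kE).Nodup) :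
    PySem.List.sorted (E.map h) kB = (PySem.List.sorted E kE).map h := by
  apply PySem.List.sorted_eq_of_perm_of_pairwise_lt
  · exact (PySem.List.sorted_perm E kE false).map h
  · have hnd' : ((PySem.List.sorted E kE).map kE).Nodup :=
      (((PySem.List.sorted_perm E kE false).map kE).nodup_iff).mpr hnd
    have hne : (PySem.List.sorted E kE).Pairwise (fun a b => kE a ≠ kE b) :=
      List.pairwise_map.mp hnd'
    have hle := PySem.List.sorted_pairwise E kE
    rw [List.pairwise_map]
    simp only [hfst]
    exact (hle.and hne).imp (fun hab => lt_of_le_of_ne hab.1 hab.2)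

-- sort commutes with filter (distinct keys): filtering the sorted list IS the sorted filtered list
theorem pv_sorted_filter (ts : List (String × List (String × String)))
    (hnd : (ts.map Prod.fst).Nodup) :
    PySem.List.sorted (ts.filter pvGuard) (fun kv => kv.1)
      = (PySem.List.sorted ts (fun kv => kv.1)).filter pvGuard := by
  apply PySem.List.sorted_eq_of_perm_of_pairwise_lt
  · exact (PySem.List.sorted_perm ts (fun kv => kv.1) false).filter pvGuard
  · have hnd' : ((PySem.List.sorted ts (fun kv => kv.1) false).map Prod.fst).Nodup :=
      (((PySem.List.sorted_perm ts (fun kv => kv.1) false).map Prod.fst).nodup_iff).mpr hnd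
    have hne : (PySem.List.sorted ts (fun kv => kv.1) false).Pairwise
        (fun a b => a.1 ≠ b.1) := by
      have := List.pairwise_map.mp hnd'
      exact this
    have hle := PySem.List.sorted_pairwise ts (fun kv => kv.1)
    have : (PySem.List.sorted ts (fun kv => kv.1) false).Pairwise
        (fun a b => a.1 < b.1) :=
      (hle.and hne).imp (fun hab => lt_of_le_of_ne hab.1 hab.2)
    exact (this.sublist List.filter_sublist).imp id

-- the A-loop over the pair of dicts, componentwise over the filtered list
theorem pv_fold_pair (ts : List (String × List (String × String)))
    (d1 d2 : PySem.Dict String String) :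
    ts.foldl pvStep (d1, d2)
    = ((ts.filter pvGuard).foldl (fun d kv => d.insert kv.1 (pvZh kv)) d1,
       (ts.filter pvGuard).foldl (fun d kv => d.insert kv.1 (pvEn kv)) d2) := by
  induction ts generalizing d1 d2 with
  | nil => rfl
  | cons kv t ih =>
    by_cases hg : pvGuard kv = true
    · rw [List.foldl_cons, pvStep_pos _ _ hg, ih, List.filter_cons_of_pos hg,
        List.foldl_cons, List.foldl_cons]
    · rw [List.foldl_cons, pvStep_neg _ _ hg, ih,
        List.filter_cons_of_neg (by simpa using hg)]

-- B's accumulator loop, in closed form over the filtered list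
def pvBStep (b : String × String) (kv : String × List (String × String)) : String × String :=
  let v := PySem.Dict.mk kv.2
  if v.contains "zh" && v.contains "en" then
    let k := PySem.Str.replace kv.1 "\"" "\\\""
    (b.1 ++ ("\n                \"" ++ k ++ "\": \"" ++ PySem.Str.replace (v.getD "zh" "") "\"" "\\\"" ++ "\","),
     b.2 ++ ("\n                \"" ++ k ++ "\": \"" ++ PySem.Str.replace (v.getD "en" "") "\"" "\\\"" ++ "\","))
  else b

theorem pv_walk_eq (L : List (String × List (String × String))) : ∀ (z0 e0 : String),
    L.foldl pvBStep (z0, e0)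
      = (z0 ++ pvCat ((L.filter pvGuard).map (fun kv => "\n" ++ pvLine kv.1 (pvZh kv))),
         e0 ++ pvCat ((L.filter pvGuard).map (fun kv => "\n" ++ pvLine kv.1 (pvEn kv)))) := by
  induction L with
  | nil => intro z0 e0; simp [pvCat]
  | cons kv t ih =>
    intro z0 e0
    by_cases hg : pvGuard kv = true
    · have hg' := hg; simp only [pvGuard] at hg'
      rw [List.foldl_cons, show pvBStep (z0, e0) kv
          = (z0 ++ ("\n" ++ pvLine kv.1 (pvZh kv)), e0 ++ ("\n" ++ pvLine kv.1 (pvEn kv))) by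
        simp only [pvBStep, hg', if_pos, pvLine, pvEsc, pvZh, pvEn]
        constructor <;> simp [String.append_assoc], ih]
      rw [List.filter_cons_of_pos hg]
      simp [pvCat, String.append_assoc]
    · have hg' := hg; simp only [pvGuard] at hg'
      rw [List.foldl_cons, show pvBStep (z0, e0) kv = (z0, e0) by
        simp only [pvBStep]; rw [if_neg (by simpa using hg')], ih,
        List.filter_cons_of_neg (by simpa using hg)]

-- '\n'.join written as a flat concatenation
theorem pv_join_cons (xs : List String) : ∀ (x : String),
    PySem.Str.join "\n" (x :: xs) = x ++ pvCat (xs.map (fun l => "\n" ++ l)) := by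
  induction xs with
  | nil =>
    intro x
    simp [PySem.Str.join, PySem.Chars.join, List.intercalate, pvCat, String.ofList]
  | cons y t ih =>
    intro x
    have h1 : PySem.Str.join "\n" (x :: y :: t)
        = x ++ "\n" ++ PySem.Str.join "\n" (y :: t) := by
      simp only [PySem.Str.join, PySem.Chars.join, List.map_cons]
      rw [show "\n".toList.intercalate (x.toList :: y.toList :: t.map String.toList)
          = x.toList ++ "\n".toList ++ "\n".toList.intercalate (y.toList :: t.map String.toList) by
        simp [List.intercalate]]
      simp [String.ofList_append, String.append_assoc]
      rw [show ('\n' :: ['\n'].intercalate (y.toList :: t.map String.toList))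
          = "\n".toList ++ ['\n'].intercalate (y.toList :: t.map String.toList) from rfl,
        String.ofList_append]
      simp
    rw [h1, ih y]
    simp [pvCat, String.append_assoc]

-- the frame: join of the line list = B's concatenation shape
theorem pv_assemble (zs es : List String) :
    PySem.Str.join "\n" (["        self.translations = {", "            \"zh\": {"]
        ++ zs ++ ["            },", "            \"en\": {"] ++ es ++ ["            }", "        }"])
    = "        self.translations = {\n            \"zh\": {"
        ++ pvCat (zs.map (fun l => "\n" ++ l))
        ++ "\n            },\n            \"en\": {"
        ++ pvCat (es.map (fun l => "\n" ++ l))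
        ++ "\n            }\n        }" := by
  have hseed : ∀ (xs : List String) (a : String),
      List.foldr (fun x1 x2 => x1 ++ x2) a xs = List.foldr (fun x1 x2 => x1 ++ x2) "" xs ++ a := by
    intro xs
    induction xs with
    | nil => intro a; simp
    | cons x t ih => intro a; simp [List.foldr_cons, ih a, String.append_assoc]
  rw [show (["        self.translations = {", "            \"zh\": {"]
        ++ zs ++ ["            },", "            \"en\": {"] ++ es ++ ["            }", "        }"])
      = "        self.translations = {" :: ("            \"zh\": {"
        :: (zs ++ ["            },", "            \"en\": {"] ++ es ++ ["            }", "        }"])) by simp,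
    pv_join_cons]
  simp [pvCat, List.map_append, String.append_assoc]
  rw [hseed, hseed (List.map (fun l => "\n" ++ l) es)]
  rw [← String.append_assoc (s₁ := "        self.translations = {") (s₂ := "\n            \"zh\": {"),
    ← String.append_assoc (s₁ := "\n            },") (s₂ := "\n            \"en\": {")]
  simp

-- ===== VERDICT (by name: the statement is the Claim_ definition above) =====
theorem generate_translations_code_spec : Claim_equal_generate_translations_code := by
  intro ts _ hpre
  unfold Spec_generate_translations_code
  simp only [generate_translations_code, generate_translations_code_alt]
  have hfoldA : ts.foldl
      (fun (p : PySem.Dict String String × PySem.Dict String String) kv =>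
        let v := PySem.Dict.mk kv.2
        if v.contains "zh" && v.contains "en" then
          (p.1.insert kv.1 (v.getD "zh" ""), p.2.insert kv.1 (v.getD "en" ""))
        else p)
      (PySem.Dict.empty, PySem.Dict.empty) = ts.foldl pvStep (PySem.Dict.empty, PySem.Dict.empty) := rfl
  rw [hfoldA, pv_fold_pair]
  set F := ts.filter pvGuard with hF
  have hndF : (F.map (fun kv => kv.1)).Nodup := by
    have : (F.map (fun kv => kv.1)).Sublist (ts.map Prod.fst) :=
      (List.filter_sublist (l := ts)).map _
    exact this.nodup hpre.1
  have hz : ((F.foldl (fun d kv => d.insert kv.1 (pvZh kv)) PySem.Dict.empty).items)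
      = F.map (fun kv => (kv.1, pvZh kv)) := by
    have := PySem.Dict.items_foldl_insert_fresh F (fun kv => kv.1) pvZh PySem.Dict.empty
      (by intro a _; simp [PySem.Dict.contains_empty]) hndF
    simpa [PySem.Dict.items] using this
  have he : ((F.foldl (fun d kv => d.insert kv.1 (pvEn kv)) PySem.Dict.empty).items)
      = F.map (fun kv => (kv.1, pvEn kv)) := by
    have := PySem.Dict.items_foldl_insert_fresh F (fun kv => kv.1) pvEn PySem.Dict.empty
      (by intro a _; simp [PySem.Dict.contains_empty]) hndF
    simpa [PySem.Dict.items] using this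
  rw [hz, he]
  -- A side: tuple sort = key sort, sort of the image = image of the sort
  have hndz : ((F.map (fun kv => (kv.1, pvZh kv))).map (fun q => q.1)).Nodup := by
    rw [List.map_map]; exact hndF
  have hnde : ((F.map (fun kv => (kv.1, pvEn kv))).map (fun q => q.1)).Nodup := by
    rw [List.map_map]; exact hndF
  rw [pv_sorted2_eq_sorted _ _ _ hndz, pv_sorted2_eq_sorted _ _ _ hnde,
    pv_sorted_map F (fun kv => (kv.1, pvZh kv)) (fun kv => kv.1) (fun q => q.1) (fun _ => rfl) hndF,
    pv_sorted_map F (fun kv => (kv.1, pvEn kv)) (fun kv => kv.1) (fun q => q.1) (fun _ => rfl) hndF,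
    PySem.List.foldl_append_singleton_eq_map, PySem.List.foldl_append_singleton_eq_map,
    List.map_map, List.map_map]
  -- B side: walk over the pre-sorted list = pvCat over the sorted filtered list
  have hfoldB : (PySem.List.sorted ts (fun kv => kv.1)).foldl
      (fun (b : String × String) kv =>
        let v := PySem.Dict.mk kv.2
        if v.contains "zh" && v.contains "en" then
          let k := PySem.Str.replace kv.1 "\"" "\\\""
          (b.1 ++ ("\n                \"" ++ k ++ "\": \"" ++ PySem.Str.replace (v.getD "zh" "") "\"" "\\\"" ++ "\","),
           b.2 ++ ("\n                \"" ++ k ++ "\": \"" ++ PySem.Str.replace (v.getD "en" "") "\"" "\\\"" ++ "\","))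
        else b)
      ("", "")
    = (PySem.List.sorted ts (fun kv => kv.1)).foldl pvBStep ("", "") := rfl
  rw [hfoldB, pv_walk_eq _ "" "", ← pv_sorted_filter ts hpre.1, ← hF]
  -- both sides are the same frame around the same two line lists
  have hA : ∀ (S : List (String × List (String × String))),
      S.map ((fun q : String × String =>
          "                \"" ++ PySem.Str.replace q.1 "\"" "\\\"" ++ "\": \""
            ++ PySem.Str.replace q.2 "\"" "\\\"" ++ "\",") ∘ (fun kv => (kv.1, pvZh kv)))
        = S.map (fun kv => pvLine kv.1 (pvZh kv)) := fun S => rfl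
  have hB : ∀ (S : List (String × List (String × String))),
      S.map ((fun q : String × String =>
          "                \"" ++ PySem.Str.replace q.1 "\"" "\\\"" ++ "\": \""
            ++ PySem.Str.replace q.2 "\"" "\\\"" ++ "\",") ∘ (fun kv => (kv.1, pvEn kv)))
        = S.map (fun kv => pvLine kv.1 (pvEn kv)) := fun S => rfl
  rw [hA, hB]
  have := pv_assemble
    ((PySem.List.sorted F (fun kv => kv.1)).map (fun kv => pvLine kv.1 (pvZh kv)))
    ((PySem.List.sorted F (fun kv => kv.1)).map (fun kv => pvLine kv.1 (pvEn kv)))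
  simp only [List.map_map, Function.comp_def] at this
  simp only [List.append_assoc, List.cons_append, List.nil_append] at this ⊢
  exact this
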